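-- pv_equiv track=rewrite | github.com/Chandravo/Leetcode | cisco2.py | getMaxSizeHappyNumSet
-- ===== SOURCE A (Python) =====
-- def sumSquare(n):
--     sum = 0
--     while n != 0:
--         rem = n % 10
--         sum += rem * rem
--         n = n // 10
--     return sum
--
-- def isHappy(n):
--     if n == 1 or n == 7:
--         return True
--
--     while n > 9:
--         n = sumSquare(n)
--         if n <= 9:
--             if n == 1 or n == 7:
--                 return True
--             else:
--                 break
--     return False
--
-- def getMaxSizeHappyNumSet(happyNumLow, happyNumHigh):
--     happy_set = set()
--     for i in range(happyNumLow, happyNumHigh + 1):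
--         if isHappy(i):
--             s = str(i)
--             temp = int(''.join(sorted(s)))
--             happy_set.add(temp)
--     return len(happy_set)
-- ===== SOURCE B (Python) =====
-- def sumSquare(n):
--     sum = 0
--     while n != 0:
--         rem = n % 10
--         sum += rem * rem
--         n = n // 10
--     return sum
--
-- def isHappy(n):
--     if n <= 9:
--         return n == 1 or n == 7
--     seen = set()
--     while n not in seen:
--         seen.add(n)
--         n = sumSquare(n)
--         if n <= 9:
--             return n == 1 or n == 7
--     return False
--
-- def getMaxSizeHappyNumSet(happyNumLow, happyNumHigh):
--     return len({int(''.join(sorted(str(i))))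
--                 for i in range(happyNumLow, happyNumHigh + 1)
--                 if isHappy(i)})
-- ===== Notes on version B (the rewrite author's own statement) =====
-- stated objective: idiomatic
-- what changed: isHappy is rewritten as the standard seen-set cycle detector (maintains a history of visited values and stops on a repeat) instead of A's single-digit-convergence loop with the {1,7} shortcut, and the outer scan becomes a set comprehension instead of an explicit loop mutating a set.
import Mathlib
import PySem

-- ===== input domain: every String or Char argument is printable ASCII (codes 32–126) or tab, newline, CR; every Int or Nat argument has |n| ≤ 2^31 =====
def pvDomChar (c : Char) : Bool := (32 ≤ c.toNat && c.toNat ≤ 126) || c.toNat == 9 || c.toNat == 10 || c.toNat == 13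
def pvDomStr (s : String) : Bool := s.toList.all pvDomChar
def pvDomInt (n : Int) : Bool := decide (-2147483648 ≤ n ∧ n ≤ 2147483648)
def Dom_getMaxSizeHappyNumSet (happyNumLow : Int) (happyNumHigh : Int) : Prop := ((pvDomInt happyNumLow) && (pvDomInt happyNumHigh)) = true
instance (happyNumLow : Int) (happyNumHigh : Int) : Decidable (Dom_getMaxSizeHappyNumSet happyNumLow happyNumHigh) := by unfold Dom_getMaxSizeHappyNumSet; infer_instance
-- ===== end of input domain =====

-- B replaces A's single-digit-convergence isHappy loop by the standard seen-set cycle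
-- detector and builds the set of canonical (sorted-digit) forms as one comprehension;
-- same results, alternative structure (not claimed faster).

-- ===== PORT A =====
-- shared helper: both Source A and Source B contain this identical sumSquare; fuel 12 covers
-- every |n| < 10^12 ⊇ the domain (Python's loop is unbounded; on the admitted inputs
-- it always terminates within 12 divisions by 10, so the port is exact there)
def sumSquareAux : Nat → Int → Int → Int
  | 0, acc, _ => acc
  | f + 1, acc, n =>
    if n ≠ 0 then
      let rem := PySem.Int.mod n 10
      sumSquareAux f (acc + rem * rem) (PySem.Int.floordiv n 10)
    else acc

def sumSquare (n : Int) : Int := sumSquareAux 12 0 n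

-- shared helper: int(''.join(sorted(str(i)))) — identical expression in Source A and Source B.
-- int() cannot fail on a sorted permutation of str(i), so getD 0 is never taken.
def canonical (i : Int) : Int :=
  (PySem.Int.ofStr? (String.ofList (PySem.List.sorted (PySem.Int.toStr i).toList (fun c => c) false))).getD 0

-- A's while-loop of isHappy; fuel 1000 (the loop needs < 20 iterations on the domain)
def isHappyLoopA : Nat → Int → Bool
  | 0, _ => false
  | f + 1, n =>
    if 9 < n then
      let n' := sumSquare n
      if n' ≤ 9 then
        if n' = 1 ∨ n' = 7 then true else false
      else isHappyLoopA f n'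
    else false

def isHappyA (n : Int) : Bool :=
  if n = 1 ∨ n = 7 then true
  else isHappyLoopA 1000 n

def getMaxSizeHappyNumSet (happyNumLow : Int) (happyNumHigh : Int) : Int :=
  let happy_set : PySem.Set Int :=
    (PySem.List.pyRange happyNumLow (happyNumHigh + 1) 1).foldl
      (fun s i => if isHappyA i then PySem.Set.add s (canonical i) else s)
      PySem.Set.empty
  PySem.Set.len happy_set

-- ===== PORT B =====
-- B's while-loop: seen-set cycle detection; same fuel constant 1000
def isHappyLoopB : Nat → PySem.Set Int → Int → Bool
  | 0, _, _ => false
  | f + 1, seen, n =>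
    if PySem.Set.contains seen n then false
    else
      let seen' := PySem.Set.add seen n
      let n' := sumSquare n
      if n' ≤ 9 then decide (n' = 1 ∨ n' = 7)
      else isHappyLoopB f seen' n'

def isHappyB (n : Int) : Bool :=
  if n ≤ 9 then decide (n = 1 ∨ n = 7)
  else isHappyLoopB 1000 PySem.Set.empty n

def getMaxSizeHappyNumSet_alt (happyNumLow : Int) (happyNumHigh : Int) : Int :=
  PySem.Set.len (PySem.Set.ofList
    (((PySem.List.pyRange happyNumLow (happyNumHigh + 1) 1).filter isHappyB).map canonical))

-- ===== PRECONDITION & SPEC =====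
def Spec_getMaxSizeHappyNumSet (happyNumLow : Int) (happyNumHigh : Int) (out : Int) : Prop := out = getMaxSizeHappyNumSet_alt happyNumLow happyNumHigh
instance (happyNumLow : Int) (happyNumHigh : Int) (out : Int) : Decidable (Spec_getMaxSizeHappyNumSet happyNumLow happyNumHigh out) := by unfold Spec_getMaxSizeHappyNumSet; infer_instance

-- ===== CLAIM (what is proved, stated in full; the proofs are below) =====
def Claim_equal_getMaxSizeHappyNumSet : Prop := ∀ (happyNumLow : Int) (happyNumHigh : Int), Dom_getMaxSizeHappyNumSet happyNumLow happyNumHigh → Spec_getMaxSizeHappyNumSet happyNumLow happyNumHigh (getMaxSizeHappyNumSet happyNumLow happyNumHigh)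

-- ===== LEMMAS AND PROOFS =====

-- k-fold application of sumSquare (the happy-number trajectory)
def pvT : Nat → Int → Int
  | 0, n => n
  | s + 1, n => sumSquare (pvT s n)

-- neutral reference loop: iterate sumSquare while > 9, then test membership in {1, 7}
def pvIter : Nat → Int → Bool
  | 0, _ => false
  | f + 1, n => if n ≤ 9 then decide (n = 1 ∨ n = 7) else pvIter f (sumSquare n)

-- bounded reachability of a single digit (for the finite decide fact)
def pvReach : Nat → Int → Bool
  | 0, _ => false
  | f + 1, n => if n ≤ 9 then true else pvReach f (sumSquare n)

theorem pvT_add (a b : Nat) (n : Int) : pvT a (pvT b n) = pvT (b + a) n := by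
  induction a with
  | zero => rfl
  | succ a ih => simp only [pvT, ih]; rfl

theorem sumSquareAux_le (f : Nat) : ∀ (d : Nat) (acc n : Int), 0 ≤ n → n < (10 : Int) ^ d →
    d ≤ f → sumSquareAux f acc n ≤ acc + 81 * d := by
  induction f with
  | zero =>
    intro d acc n _ _ hd
    interval_cases d
    simp [sumSquareAux]
  | succ f ih =>
    intro d acc n h0 h1 hd
    by_cases hz : n = 0
    · subst hz
      simp only [sumSquareAux, ne_eq, not_true_eq_false, if_false]
      have : (0 : Int) ≤ 81 * (d : Int) := by positivity
      omega
    · match d with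
      | 0 =>
        exfalso
        simp only [pow_zero] at h1
        omega
      | d' + 1 =>
        have hrem_eq : PySem.Int.mod n 10 = n % 10 := PySem.Int.mod_eq_emod_of_pos (by norm_num)
        have hdiv_eq : PySem.Int.floordiv n 10 = n / 10 := PySem.Int.floordiv_eq_ediv_of_pos (by norm_num)
        have hr0 : 0 ≤ n % 10 := Int.emod_nonneg n (by norm_num)
        have hr1 : n % 10 < 10 := Int.emod_lt_of_pos n (by norm_num)
        have hq0 : 0 ≤ n / 10 := Int.ediv_nonneg h0 (by norm_num)
        have hq1 : n / 10 < (10 : Int) ^ d' := by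
          rw [Int.ediv_lt_iff_lt_mul (by norm_num)]
          calc n < (10 : Int) ^ (d' + 1) := h1
            _ = (10 : Int) ^ d' * 10 := by ring
        have hsq : n % 10 * (n % 10) ≤ 81 := by nlinarith
        have hrec := ih d' (acc + n % 10 * (n % 10)) (n / 10) hq0 hq1 (by omega)
        simp only [sumSquareAux, ne_eq, hz, not_false_eq_true, if_true, hrem_eq, hdiv_eq]
        push_cast
        push_cast at hrec
        linarith

theorem sumSquare_le (n : Int) (d : Nat) (h0 : 0 ≤ n) (h1 : n < (10 : Int) ^ d) (h2 : d ≤ 12) :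
    sumSquare n ≤ 81 * d := by
  have := sumSquareAux_le 12 d 0 n h0 h1 h2
  simpa [sumSquare] using this

-- every trajectory value after the first step stays ≤ 810 (while the loop is live)
theorem pvT_ub (n : Int) (h0 : 0 ≤ n) (h1 : n ≤ 2147483648) :
    ∀ s : Nat, (∀ i : Nat, i ≤ s → 9 < pvT i n) → pvT (s + 1) n ≤ 810 := by
  intro s
  induction s with
  | zero =>
    intro _
    have h2 : n < (10 : Int) ^ 10 := by norm_num; omega
    have := sumSquare_le n 10 h0 h2 (by norm_num)
    simpa [pvT] using this
  | succ s ih =>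
    intro hlive
    have hprev : pvT (s + 1) n ≤ 810 := ih (fun i hi => hlive i (by omega))
    have hpos : 9 < pvT (s + 1) n := hlive (s + 1) (by omega)
    have h2 : pvT (s + 1) n < (10 : Int) ^ 3 := by norm_num; omega
    have := sumSquare_le (pvT (s + 1) n) 3 (by omega) h2 (by norm_num)
    have heq : pvT (s + 1 + 1) n = sumSquare (pvT (s + 1) n) := rfl
    omega

-- the finite core fact: from every start in [0, 810] a single digit is reached quickly
set_option maxRecDepth 4000 in
theorem pvFactF : ∀ m : Nat, m < 811 → pvReach 20 (m : Int) = true := by decide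

theorem pvReach_spec : ∀ (f : Nat) (n : Int), pvReach f n = true → ∃ s : Nat, pvT s n ≤ 9 := by
  intro f
  induction f with
  | zero => intro n h; simp [pvReach] at h
  | succ f ih =>
    intro n h
    by_cases hn : n ≤ 9
    · exact ⟨0, hn⟩
    · simp only [pvReach, if_neg hn] at h
      obtain ⟨s, hs⟩ := ih (sumSquare n) h
      refine ⟨s + 1, ?_⟩
      have : pvT s (sumSquare n) = pvT s (pvT 1 n) := rfl
      rw [this, pvT_add] at hs
      simpa [Nat.add_comm] using hs

-- no value can repeat while the loop is live (distinct trajectory prefix)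
theorem pvDist (n : Int) (h0 : 0 ≤ n) (h1 : n ≤ 2147483648) :
    ∀ j k : Nat, j < k → (∀ i : Nat, i ≤ k → 9 < pvT i n) → pvT j n ≠ pvT k n := by
  have aux : ∀ j k : Nat, 1 ≤ j → j < k → (∀ i : Nat, i ≤ k → 9 < pvT i n) →
      pvT j n = pvT k n → False := by
    intro j k hj1 hjk hlive heq
    have cyc : ∀ s : Nat, ∃ i : Nat, j ≤ i ∧ i < k ∧ pvT (j + s) n = pvT i n := by
      intro s
      induction s with
      | zero => exact ⟨j, le_refl j, hjk, rfl⟩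
      | succ s ihs =>
        obtain ⟨i, hi1, hi2, he⟩ := ihs
        have hstep : pvT (j + s + 1) n = pvT (i + 1) n := by
          show sumSquare (pvT (j + s) n) = sumSquare (pvT i n)
          rw [he]
        by_cases hik : i + 1 < k
        · exact ⟨i + 1, by omega, hik, by simpa [Nat.add_assoc] using hstep⟩
        · have hk : i + 1 = k := by omega
          refine ⟨j, le_refl j, hjk, ?_⟩
          rw [show j + (s + 1) = j + s + 1 by omega, hstep, hk, ← heq]
    have hm0 : 9 < pvT j n := hlive j (by omega)
    have hm1 : pvT j n ≤ 810 := by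
      have := pvT_ub n h0 h1 (j - 1) (fun i hi => hlive i (by omega))
      rwa [show j - 1 + 1 = j by omega] at this
    have hreach := pvFactF (pvT j n).toNat (by omega)
    rw [Int.toNat_of_nonneg (by omega)] at hreach
    obtain ⟨s, hs⟩ := pvReach_spec 20 (pvT j n) hreach
    have hcomp : pvT s (pvT j n) = pvT (j + s) n := pvT_add s j n
    obtain ⟨i, _, hi2, he⟩ := cyc s
    rw [hcomp, he] at hs
    have := hlive i (by omega)
    omega
  intro j k hjk hlive heq
  match j, hjk with
  | 0, hjk =>
    have h1k : 1 ≤ k := by omega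
    have heq' : pvT 1 n = pvT (k + 1) n := by
      show sumSquare (pvT 0 n) = sumSquare (pvT k n)
      rw [heq]
    refine aux 1 (k + 1) (le_refl 1) (by omega) ?_ heq'
    intro i hi
    by_cases hik : i ≤ k
    · exact hlive i hik
    · have : i = k + 1 := by omega
      rw [this, ← heq']
      exact hlive 1 h1k
  | j' + 1, hjk => exact aux (j' + 1) k (by omega) hjk hlive heq

theorem loopA_eq_iter : ∀ (f : Nat) (n : Int), 9 < n → isHappyLoopA f n = pvIter (f + 1) n := by
  intro f
  induction f with
  | zero =>
    intro n hn
    simp [isHappyLoopA, pvIter, show ¬ n ≤ 9 by omega]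
  | succ f ih =>
    intro n hn
    have hrhs : pvIter (f + 1 + 1) n = pvIter (f + 1) (sumSquare n) := by
      simp [pvIter, show ¬ n ≤ 9 by omega]
    rw [hrhs]
    simp only [isHappyLoopA, if_pos hn]
    by_cases hle : sumSquare n ≤ 9
    · by_cases h17 : sumSquare n = 1 ∨ sumSquare n = 7 <;> simp [pvIter, hle, h17]
    · rw [if_neg hle, ih (sumSquare n) (by omega)]

theorem loopB_eq_iter (n₀ : Int)
    (hdist : ∀ j k : Nat, j < k → (∀ i : Nat, i ≤ k → 9 < pvT i n₀) → pvT j n₀ ≠ pvT k n₀) :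
    ∀ (f m : Nat) (seen : PySem.Set Int),
      (∀ i : Nat, i ≤ m → 9 < pvT i n₀) →
      (∀ j : Nat, m ≤ j → (∀ i : Nat, i ≤ j → 9 < pvT i n₀) → pvT j n₀ ∉ seen) →
      isHappyLoopB f seen (pvT m n₀) = pvIter (f + 1) (pvT m n₀) := by
  intro f
  induction f with
  | zero =>
    intro m seen hlive _
    have h9 : 9 < pvT m n₀ := hlive m (le_refl m)
    simp [isHappyLoopB, pvIter, show ¬ pvT m n₀ ≤ 9 by omega]
  | succ f ih =>
    intro m seen hlive hseen
    have h9 : 9 < pvT m n₀ := hlive m (le_refl m)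
    have hnm : pvT m n₀ ∉ seen := hseen m (le_refl m) hlive
    have hcontains : PySem.Set.contains seen (pvT m n₀) = false := by
      rcases h : PySem.Set.contains seen (pvT m n₀) with _ | _
      · rfl
      · exact absurd ((PySem.Set.contains_iff seen (pvT m n₀)).1 h) hnm
    have hstep : sumSquare (pvT m n₀) = pvT (m + 1) n₀ := rfl
    have hrhs : pvIter (f + 1 + 1) (pvT m n₀) = pvIter (f + 1) (pvT (m + 1) n₀) := by
      simp [pvIter, show ¬ pvT m n₀ ≤ 9 by omega, hstep]
    rw [hrhs]
    simp only [isHappyLoopB, hcontains, Bool.false_eq_true, if_false, hstep]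
    by_cases hle : pvT (m + 1) n₀ ≤ 9
    · simp [pvIter, hle]
    · simp only [if_neg hle]
      have hlive' : ∀ i : Nat, i ≤ m + 1 → 9 < pvT i n₀ := by
        intro i hi
        by_cases him : i ≤ m
        · exact hlive i him
        · have hieq : i = m + 1 := by omega
          rw [hieq]; omega
      have hseen' : ∀ j : Nat, m + 1 ≤ j → (∀ i : Nat, i ≤ j → 9 < pvT i n₀) →
          pvT j n₀ ∉ PySem.Set.add seen (pvT m n₀) := by
        intro j hj hlj
        rw [PySem.Set.mem_add]
        rintro (hmem | heq)
        · exact hseen j (by omega) hlj hmem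
        · exact hdist m j (by omega) hlj heq.symm
      exact ih (m + 1) (PySem.Set.add seen (pvT m n₀)) hlive' hseen'

theorem isHappy_eq (n : Int) (h : n ≤ 2147483648) : isHappyA n = isHappyB n := by
  by_cases h9 : n ≤ 9
  · unfold isHappyA isHappyB
    by_cases h17 : n = 1 ∨ n = 7
    · simp [h17, h9]
    · have : isHappyLoopA 1000 n = false := by
        simp [isHappyLoopA, show ¬ 9 < n by omega]
      simp [h17, h9, this]
  · have h0 : (0 : Int) ≤ n := by omega
    have hdist := pvDist n h0 (by omega)
    have hA : isHappyA n = pvIter 1001 n := by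
      unfold isHappyA
      rw [if_neg (by omega), loopA_eq_iter 1000 n (by omega)]
    have hB : isHappyB n = pvIter 1001 n := by
      unfold isHappyB
      rw [if_neg h9]
      have := loopB_eq_iter n hdist 1000 0 PySem.Set.empty
        (fun i hi => by interval_cases i; simpa [pvT] using (by omega : 9 < n))
        (fun j _ _ => by simp [PySem.Set.empty])
      simpa [pvT] using this
    rw [hA, hB]

theorem fold_add_eq (g : Int → Int) (p : Int → Bool) :
    ∀ (xs : List Int) (s : PySem.Set Int),
      xs.foldl (fun s i => if p i then PySem.Set.add s (g i) else s) s
        = ((xs.filter p).map g).foldl PySem.Set.add s := by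
  intro xs
  induction xs with
  | nil => intro s; rfl
  | cons x xs ih =>
    intro s
    by_cases h : p x <;> simp [List.foldl, List.filter, h, ih]

-- ===== VERDICT (by name: the statement is the Claim_ definition above) =====
theorem getMaxSizeHappyNumSet_spec : Claim_equal_getMaxSizeHappyNumSet := by
  intro lo hi hdom
  unfold Spec_getMaxSizeHappyNumSet
  unfold Dom_getMaxSizeHappyNumSet pvDomInt at hdom
  simp only [Bool.and_eq_true, decide_eq_true_eq] at hdom
  have hfilter : (PySem.List.pyRange lo (hi + 1) 1).filter isHappyA
      = (PySem.List.pyRange lo (hi + 1) 1).filter isHappyB := by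
    apply List.filter_congr
    intro i hi'
    have hmem := (PySem.List.mem_pyRange_one).1 hi'
    exact isHappy_eq i (by omega)
  unfold getMaxSizeHappyNumSet getMaxSizeHappyNumSet_alt
  rw [fold_add_eq, hfilter]
  rfl
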